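-- pv_equiv track=rewrite | github.com/Glan9/Gaia | operators.py | incrementWord
-- ===== SOURCE A (Python) =====
-- def incrementWord(word):
-- 	if len(word) == 0:
-- 		return 'a'
-- 	else:
-- 		if word[-1] == 'z':
-- 			if len(word) == 1:
-- 				return 'aa'
-- 			else:
-- 				return incrementWord(word[:-1])+'a'
-- 		elif word[-1] == 'Z':
-- 			if len(word) == 1:
-- 				return 'AA'
-- 			else:
-- 				return incrementWord(word[:-1])+'A'
-- 		else:
-- 			return word[:-1]+chr(ord(word[-1])+1)
-- ===== SOURCE B (Python) =====
-- def incrementWord(word):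
--     wrap = {'z': 'a', 'Z': 'A'}
--     i = len(word) - 1
--     while i >= 0 and word[i] in wrap:
--         i -= 1
--     tail = ''.join(wrap[c] for c in word[i + 1:])
--     if i >= 0:
--         return word[:i] + chr(ord(word[i]) + 1) + tail
--     if not word:
--         return 'a'
--     return wrap[word[0]] + tail
-- ===== Notes on version B (the rewrite author's own statement) =====
-- stated objective: alternative
-- what changed: Replaced A's recursion (one string slice+concat per carry, quadratic on long z/Z runs) with a single right-to-left scan locating the maximal z/Z suffix, then one-pass assembly of the result.
import Mathlib
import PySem

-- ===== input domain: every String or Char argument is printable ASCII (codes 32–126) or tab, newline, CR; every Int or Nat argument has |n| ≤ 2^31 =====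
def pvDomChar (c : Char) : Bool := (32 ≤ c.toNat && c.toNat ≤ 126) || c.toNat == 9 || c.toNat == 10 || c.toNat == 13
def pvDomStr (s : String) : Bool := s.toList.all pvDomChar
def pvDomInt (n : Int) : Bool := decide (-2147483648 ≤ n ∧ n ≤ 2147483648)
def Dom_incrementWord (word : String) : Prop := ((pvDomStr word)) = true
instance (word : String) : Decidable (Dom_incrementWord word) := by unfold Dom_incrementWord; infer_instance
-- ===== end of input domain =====

-- B replaces A's per-carry recursion (slice+concat each step) by a single right-to-left
-- scan of the maximal z/Z suffix followed by one-pass assembly; return value proved equal.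


-- ===== PORT A =====
-- A recurses on word[:-1]; we transliterate over the REVERSED char list, so word[-1]
-- is the head, and "incrementWord(word[:-1]) + ch" is "ch :: revA rest"; the final
-- String reverses back. chr(ord(c)+1) is Char.ofNat (c.toNat + 1).
def revA : List Char → List Char
  | [] => ['a']
  | c :: rest =>
    if c = 'z' then
      if rest = [] then ['a', 'a'] else 'a' :: revA rest
    else if c = 'Z' then
      if rest = [] then ['A', 'A'] else 'A' :: revA rest
    else Char.ofNat (c.toNat + 1) :: rest

def incrementWord (word : String) : String :=
  String.ofList (revA word.toList.reverse).reverse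

-- ===== PORT B =====
def isWrap (c : Char) : Bool := c = 'z' || c = 'Z'

def wrapc (c : Char) : Char := if c = 'z' then 'a' else 'A'

-- Source B's backwards while loop = takeWhile/dropWhile on the reversed char list;
-- then one-pass assembly of prefix, incremented char and wrapped tail.
def incrementWord_alt (word : String) : String :=
  let rcs := word.toList.reverse
  let tail := ((rcs.takeWhile isWrap).map wrapc).reverse
  match rcs.dropWhile isWrap with
  | c :: pre => String.ofList (pre.reverse ++ [Char.ofNat (c.toNat + 1)] ++ tail)
  | [] =>
    match word.toList with
    | [] => "a"
    | c0 :: _ => String.ofList (wrapc c0 :: tail)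

-- ===== PRECONDITION & SPEC =====
def Spec_incrementWord (word : String) (out : String) : Prop := out = incrementWord_alt word
instance (word : String) (out : String) : Decidable (Spec_incrementWord word out) := by unfold Spec_incrementWord; infer_instance

-- ===== CLAIM (what is proved, stated in full; the proofs are below) =====
def Claim_equal_incrementWord : Prop := ∀ (word : String), Dom_incrementWord word → Spec_incrementWord word (incrementWord word)

-- ===== LEMMAS AND PROOFS =====

-- Characterisation of revA's result (on the reversed word).
def specRev (l : List Char) : List Char :=
  (l.takeWhile isWrap).map wrapc ++
    (match l.dropWhile isWrap with
     | c :: pre => Char.ofNat (c.toNat + 1) :: pre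
     | [] =>
       match l.getLast? with
       | some x => [wrapc x]
       | none => ['a'])

lemma isWrap_iff (c : Char) : isWrap c = true ↔ c = 'z' ∨ c = 'Z' := by
  simp [isWrap]

lemma revA_cons_wrap (c : Char) (rest : List Char) (h : isWrap c = true) (hr : rest ≠ []) :
    revA (c :: rest) = wrapc c :: revA rest := by
  rcases (isWrap_iff c).mp h with rfl | rfl <;> simp [revA, wrapc, hr]

lemma revA_singleton_wrap (c : Char) (h : isWrap c = true) :
    revA [c] = [wrapc c, wrapc c] := by
  rcases (isWrap_iff c).mp h with rfl | rfl <;> simp [revA, wrapc]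

lemma revA_cons_nowrap (c : Char) (rest : List Char) (h : isWrap c = false) :
    revA (c :: rest) = Char.ofNat (c.toNat + 1) :: rest := by
  have hz : ¬ c = 'z' := by intro hc; simp [hc, isWrap] at h
  have hZ : ¬ c = 'Z' := by intro hc; simp [hc, isWrap] at h
  simp [revA, hz, hZ]

lemma revA_eq (l : List Char) : revA l = specRev l := by
  induction l with
  | nil => simp [revA, specRev]
  | cons a rest ih =>
    by_cases ha : isWrap a = true
    · cases hr : rest with
      | nil =>
        subst hr
        simp [revA_singleton_wrap a ha, specRev, ha, List.takeWhile, List.dropWhile]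
      | cons b t =>
        rw [← hr]
        have hrne : rest ≠ [] := by simp [hr]
        rw [revA_cons_wrap a rest ha hrne, ih]
        simp only [specRev, List.takeWhile_cons, List.dropWhile_cons, ha, if_pos, List.map_cons,
          List.cons_append]
        have hlast : (a :: rest).getLast? = rest.getLast? := by
          subst hr; simp [List.getLast?]
        rw [hlast]
    · have ha' : isWrap a = false := by simpa using ha
      rw [revA_cons_nowrap a rest ha']
      simp [specRev, ha']

lemma getLast?_reverse' (l : List Char) : l.reverse.getLast? = l.head? := by
  cases l with
  | nil => rfl
  | cons a t => simp

theorem incrementWord_spec : Claim_equal_incrementWord := by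
  intro word _
  unfold Spec_incrementWord incrementWord incrementWord_alt
  rw [revA_eq]
  cases hd : word.toList.reverse.dropWhile isWrap with
  | cons c pre =>
    simp only [specRev, hd, List.reverse_append, List.reverse_cons]
  | nil =>
    simp only [specRev, hd]
    cases hw : word.toList with
    | nil =>
      simp
    | cons c0 t =>
      have hlast : (c0 :: t).reverse.getLast? = some c0 := by
        rw [getLast?_reverse']; rfl
      rw [hlast]
      simp
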